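-- pv_equiv track=rewrite | github.com/fernandogonzalez11/ic1803-taller | tarea_6_Fernando_González.py | pedidos_totales
-- ===== SOURCE A (Python) =====
-- def pedidos_totales(fábricas: list) -> dict:
--     prod_total = {}
--
--     for fábrica in fábricas:
--         for producto in fábrica:
--             if producto not in prod_total:
--                 prod_total[producto] = fábrica[producto]
--             else:
--                 prod_total[producto] += fábrica[producto]
--
--     return prod_total
-- ===== SOURCE B (Python) =====
-- def pedidos_totales(fábricas: list) -> dict:
--     valores = {}
--     for fábrica in fábricas:
--         for producto, cantidad in fábrica.items():
--             valores.setdefault(producto, []).append(cantidad)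
--     return {producto: sum(vs) for producto, vs in valores.items()}
-- ===== Notes on version B (the rewrite author's own statement) =====
-- stated objective: alternative
-- what changed: Two-phase grouping: instead of A's single dict of running totals with a membership branch (insert first value, else +=), B first groups every quantity into a per-product list via setdefault/append and then builds the result with a dict comprehension summing each group.
import Mathlib
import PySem

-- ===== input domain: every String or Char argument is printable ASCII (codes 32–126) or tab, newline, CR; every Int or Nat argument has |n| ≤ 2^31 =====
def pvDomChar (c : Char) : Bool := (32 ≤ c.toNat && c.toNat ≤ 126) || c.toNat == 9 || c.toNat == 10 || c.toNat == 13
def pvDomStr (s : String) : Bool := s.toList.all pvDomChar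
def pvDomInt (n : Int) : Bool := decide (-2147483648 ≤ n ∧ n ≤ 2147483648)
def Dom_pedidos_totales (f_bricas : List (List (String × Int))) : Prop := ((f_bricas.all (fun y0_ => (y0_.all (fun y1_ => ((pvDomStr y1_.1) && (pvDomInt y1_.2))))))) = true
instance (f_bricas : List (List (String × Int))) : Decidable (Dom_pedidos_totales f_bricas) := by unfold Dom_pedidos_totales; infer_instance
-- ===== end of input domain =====

-- B replaces A's running-totals dict with its insert-or-add membership branch by a
-- two-phase grouping (collect each product's quantities in a list, then sum each group);
-- objective: alternative decomposition, same cost.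

-- ===== PORT A =====
-- Each inner list encodes a Python dict; PySem.Dict.ofList applies Python's
-- duplicate-key resolution (last value wins, first position kept).
def pedidos_totales (f_bricas : List (List (String × Int))) : List (String × Int) :=
  (f_bricas.foldl
    (fun prod_total f =>
      let fa := PySem.Dict.ofList f
      fa.keys.foldl
        (fun prod_total producto =>
          if prod_total.contains producto = false then
            -- fábrica[producto]: producto ∈ fa.keys, so the default 0 is unreachable
            prod_total.insert producto (fa.getD producto 0)
          else
            prod_total.modify producto 0 (· + fa.getD producto 0))
        prod_total)
    PySem.Dict.empty).items

-- ===== PORT B =====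
def pedidos_totales_alt (f_bricas : List (List (String × Int))) : List (String × Int) :=
  let valores : PySem.Dict String (List Int) :=
    f_bricas.foldl
      (fun valores f =>
        (PySem.Dict.ofList f).items.foldl
          -- valores.setdefault(producto, []).append(cantidad) : d[k] = d.get(k, []) + [v]
          (fun valores p => valores.modify p.1 [] (· ++ [p.2]))
          valores)
      PySem.Dict.empty
  valores.items.map (fun p => (p.1, p.2.sum))

-- ===== PRECONDITION & SPEC =====
def Spec_pedidos_totales (f_bricas : List (List (String × Int))) (out : List (String × Int)) : Prop := out = pedidos_totales_alt f_bricas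
instance (f_bricas : List (List (String × Int))) (out : List (String × Int)) : Decidable (Spec_pedidos_totales f_bricas out) := by unfold Spec_pedidos_totales; infer_instance

-- ===== CLAIM (what is proved, stated in full; the proofs are below) =====
def Claim_equal_pedidos_totales : Prop := ∀ (f_bricas : List (List (String × Int))), Dom_pedidos_totales f_bricas → Spec_pedidos_totales f_bricas (pedidos_totales f_bricas)

-- ===== LEMMAS AND PROOFS =====

-- A's insert-or-add branch is exactly Python's d[k] = d.get(k, 0) + v.
theorem pv_branch_eq_modify (acc : PySem.Dict String Int) (k : String) (v : Int) :
    (if acc.contains k = false then acc.insert k v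
     else acc.modify k 0 (· + v)) = acc.modify k 0 (· + v) := by
  by_cases h : acc.contains k = false
  · simp [h, PySem.Dict.modify, PySem.Dict.getD_of_not_contains acc 0 h]
  · simp [h]

-- A's inner loop over a factory's keys is a modify-fold over its items.
theorem pv_inner_eq_items (f : List (String × Int)) (acc : PySem.Dict String Int) :
    ((PySem.Dict.ofList f).keys.foldl
      (fun prod_total producto =>
        if prod_total.contains producto = false then
          prod_total.insert producto ((PySem.Dict.ofList f).getD producto 0)
        else
          prod_total.modify producto 0 (· + (PySem.Dict.ofList f).getD producto 0))
      acc)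
    = ((PySem.Dict.ofList f).items.foldl (fun d p => d.modify p.1 0 (· + p.2)) acc) := by
  rw [PySem.Dict.items_eq_map_keys (PySem.Dict.ofList f) (PySem.Dict.nodup_keys_ofList f) (0 : Int),
      List.foldl_map]
  simp only [pv_branch_eq_modify]

-- Either double loop over the factories flattens to one fold over all items.
theorem pv_flat {ν : Type} (step : PySem.Dict String ν → String × Int → PySem.Dict String ν)
    (fs : List (List (String × Int))) (d : PySem.Dict String ν) :
    fs.foldl (fun acc f => (PySem.Dict.ofList f).items.foldl step acc) d
    = (fs.flatMap (fun f => (PySem.Dict.ofList f).items)).foldl step d := by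
  induction fs generalizing d with
  | nil => rfl
  | cons f t ih => simp [List.flatMap_cons, List.foldl_append, ih]

-- Value of A's modify-fold at a key: starting value plus all matching contributions.
theorem pv_getD_fold (l : List (String × Int)) (d : PySem.Dict String Int) (k : String) :
    (l.foldl (fun d p => d.modify p.1 0 (· + p.2)) d).getD k 0
    = d.getD k 0 + ((l.filter (fun p => p.1 == k)).map (·.2)).sum := by
  induction l generalizing d with
  | nil => simp
  | cons p t ih =>
    simp only [List.foldl_cons, ih, List.filter_cons]
    by_cases h : p.1 = k
    · subst h
      simp
      ring
    · have hb : (p.1 == k) = false := by simp [h]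
      simp [hb, PySem.Dict.getD_modify]
      intro hk
      exact absurd hk.symm h

-- ===== VERDICT (by name: the statement is the Claim_ definition above) =====
theorem pedidos_totales_spec : Claim_equal_pedidos_totales := by
  intro fs _
  unfold Spec_pedidos_totales pedidos_totales pedidos_totales_alt
  simp only [pv_inner_eq_items, pv_flat]
  set pairs := fs.flatMap (fun f => (PySem.Dict.ofList f).items) with hpairs
  set DA := pairs.foldl (fun d p => d.modify p.1 0 (· + p.2)) PySem.Dict.empty with hDA
  set DB := pairs.foldl (fun d p => d.modify p.1 [] (· ++ [p.2])) PySem.Dict.empty with hDB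
  have hkA : DA.keys = PySem.Set.update [] (pairs.map (·.1)) := by
    rw [hDA, PySem.Dict.keys_foldl_modify_key pairs (fun p => p.1) (0 : Int)
      (fun _ p => (· + p.2)) PySem.Dict.empty, PySem.Dict.keys_empty]
  have hkB : DB.keys = PySem.Set.update [] (pairs.map (·.1)) := by
    rw [hDB, PySem.Dict.keys_foldl_modify_key pairs (fun p => p.1) ([] : List Int)
      (fun _ p => (· ++ [p.2])) PySem.Dict.empty, PySem.Dict.keys_empty]
  have hndA : DA.keys.Nodup := by
    rw [hDA]
    exact PySem.Dict.nodup_keys_foldl_modify_key pairs (fun p => p.1) (0 : Int)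
      (fun _ p => (· + p.2)) PySem.Dict.empty (by simp [PySem.Dict.keys_empty])
  have hndB : DB.keys.Nodup := by
    rw [hDB]
    exact PySem.Dict.nodup_keys_foldl_modify_key pairs (fun p => p.1) ([] : List Int)
      (fun _ p => (· ++ [p.2])) PySem.Dict.empty (by simp [PySem.Dict.keys_empty])
  rw [PySem.Dict.items_eq_map_keys DA hndA (0 : Int),
      PySem.Dict.items_eq_map_keys DB hndB ([] : List Int),
      List.map_map, hkA, hkB]
  apply List.map_congr_left
  intro k _
  have hvA : DA.getD k 0 = ((pairs.filter (fun p => p.1 == k)).map (·.2)).sum := by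
    rw [hDA, pv_getD_fold, PySem.Dict.getD_empty, zero_add]
  have hvB : DB.getD k [] = (pairs.filter (fun p => p.1 == k)).map (·.2) := by
    rw [hDB, PySem.Dict.getD_foldl_modify_append, PySem.Dict.getD_empty, List.nil_append]
  simp [hvA, hvB]
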